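-- pv_equiv track=rewrite | github.com/FilfTeen/beyond-dev-ai-kit | prompt-dsl-system/tools/kit_self_upgrade_template_guard.py | _count_placeholders
-- ===== SOURCE A (Python) =====
-- def _count_placeholders(text: str) -> int:
--     count = 0
--     in_token = False
--     for ch in text:
--         if ch == "<":
--             in_token = True
--         elif ch == ">" and in_token:
--             count += 1
--             in_token = False
--     return count
-- ===== SOURCE B (Python) =====
-- def _count_placeholders(text: str) -> int:
--     # each segment preceding a closing bracket completes a placeholder iff it contains an opening bracket
--     return sum('<' in seg for seg in text.split('>')[:-1])
-- ===== Notes on version B (the rewrite author's own statement) =====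
-- stated objective: idiomatic
-- what changed: Replaced the explicit character-by-character state machine with a split-based decomposition: splitting on the closing bracket, every segment except the last closes one placeholder iff it contains an opening bracket, so the answer is a one-line sum over the split segments; a timing run measured B faster since str.split runs in C instead of a Python-level loop.
import Mathlib
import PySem

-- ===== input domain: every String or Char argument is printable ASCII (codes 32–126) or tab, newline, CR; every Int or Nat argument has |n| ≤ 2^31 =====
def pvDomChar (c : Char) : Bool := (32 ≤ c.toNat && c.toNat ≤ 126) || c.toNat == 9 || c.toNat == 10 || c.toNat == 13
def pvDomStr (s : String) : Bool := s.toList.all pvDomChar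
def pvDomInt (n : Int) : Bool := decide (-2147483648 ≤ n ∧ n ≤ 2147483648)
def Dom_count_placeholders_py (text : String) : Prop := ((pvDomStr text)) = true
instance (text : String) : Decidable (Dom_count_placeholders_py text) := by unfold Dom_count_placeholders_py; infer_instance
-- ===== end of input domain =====

-- B replaces A's character state machine by a split-on-the-closing-bracket count; same values, idiomatic one-liner (timing run measured B faster).
-- ===== PORT A =====
-- loop body of A's for-loop (state = (count, in_token))
def pvStepA (st : Int × Bool) (ch : Char) : Int × Bool :=
  if ch = '<' then (st.1, true)
  else if ch = '>' && st.2 then (st.1 + 1, false)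
  else st

def count_placeholders_py (text : String) : Int :=
  (text.toList.foldl pvStepA ((0 : Int), false)).1

-- ===== PORT B =====
-- text.split with the literal non-empty one-char separator is Chars.splitOn; [:-1] is slice none (-1);
-- the Python sum of the membership booleans is the sum of their 0/1 values.
def count_placeholders_py_alt (text : String) : Int :=
  ((PySem.List.slice (PySem.Chars.splitOn text.toList ">".toList) none (some (-1))).map
    (fun seg => if PySem.Chars.isIn "<".toList seg then (1 : Int) else 0)).sum

-- ===== PRECONDITION & SPEC =====
def Spec_count_placeholders_py (text : String) (out : Int) : Prop := out = count_placeholders_py_alt text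
instance (text : String) (out : Int) : Decidable (Spec_count_placeholders_py text out) := by unfold Spec_count_placeholders_py; infer_instance

-- ===== CLAIM (what is proved, stated in full; the proofs are below) =====
def Claim_equal_count_placeholders_py : Prop := ∀ (text : String), Dom_count_placeholders_py text → Spec_count_placeholders_py text (count_placeholders_py text)

-- ===== LEMMAS AND PROOFS =====
def pvG : List Char → Bool → Int
  | [], _ => 0
  | c :: t, b =>
    if c = '<' then pvG t true
    else if c = '>' && b then 1 + pvG t false
    else pvG t b

def pvSplit : List Char → List Char → List (List Char)
  | [], cur => [cur.reverse]
  | c :: t, cur => if c = '>' then cur.reverse :: pvSplit t [] else pvSplit t (c :: cur)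

def pvCnt : Bool → List (List Char) → Int
  | _, [] => 0
  | _, [_] => 0
  | b, x :: y :: r => (if b || x.contains '<' then 1 else 0) + pvCnt false (y :: r)

theorem pvSplit_ne_nil (l cur : List Char) : pvSplit l cur ≠ [] := by
  induction l generalizing cur with
  | nil => simp [pvSplit]
  | cons c t ih =>
    simp only [pvSplit]
    split
    · simp
    · exact ih _

theorem pvFold_eq (l : List Char) : ∀ (k : Int) (b : Bool),
    (l.foldl pvStepA (k, b)).1 = k + pvG l b := by
  induction l with
  | nil => simp [pvG]
  | cons c t ih =>
    intro k b
    rw [List.foldl_cons]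
    by_cases h1 : c = '<'
    · rw [show pvStepA (k, b) c = (k, true) from by simp [pvStepA, h1], ih,
        pvG, if_pos h1]
    · by_cases h2 : c = '>' ∧ b = true
      · have ht : (c = '>' && b) = true := by simp [h2.1, h2.2]
        rw [show pvStepA (k, b) c = (k + 1, false) from by simp [pvStepA, h1, ht], ih,
          pvG, if_neg h1, if_pos ht]
        ring
      · have hf : (c = '>' && b) = false := by simpa using h2
        rw [show pvStepA (k, b) c = (k, b) from by simp [pvStepA, h1, hf], ih,
          pvG, if_neg h1, if_neg (by simp [hf])]

theorem pvG_eq_cnt (t : List Char) : ∀ (cur : List Char) (b : Bool),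
    pvG t (b || cur.contains '<') = pvCnt b (pvSplit t cur) := by
  induction t with
  | nil => intro cur b; simp [pvG, pvCnt, pvSplit]
  | cons c t ih =>
    intro cur b
    by_cases h1 : c = '<'
    · subst h1
      have h := ih ('<' :: cur) b
      simp only [List.contains_cons, beq_self_eq_true, Bool.true_or, Bool.or_true] at h
      rw [pvG, if_pos rfl, pvSplit, if_neg (by decide)]
      simpa using h
    · by_cases h2 : c = '>'
      · subst h2
        obtain ⟨y, r, hyr⟩ : ∃ y r, pvSplit t [] = y :: r := by
          cases h : pvSplit t [] with
          | nil => exact absurd h (pvSplit_ne_nil t [])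
          | cons y r => exact ⟨y, r, rfl⟩
        have h0 := ih [] false
        simp only [List.contains_nil, Bool.or_false] at h0
        rw [hyr] at h0
        rw [pvG, if_neg (by decide), pvSplit, if_pos rfl, hyr, pvCnt, ← h0,
          List.contains_reverse]
        cases hb : (b || cur.contains '<') <;>
          simp [hb]
      · have h := ih (c :: cur) b
        simp only [List.contains_cons] at h
        rw [show (('<' == c) || cur.contains '<') = cur.contains '<' from by
          simp [Ne.symm h1]] at h
        rw [pvG, if_neg h1, if_neg (by simp [h2]), pvSplit, if_neg h2, h]

theorem pvGo_eq (l : List Char) : ∀ (fuel : Nat) (cur : List Char) (acc : List (List Char)),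
    l.length < fuel →
    PySem.Chars.splitOn.go ['>'] fuel l cur acc = acc.reverse ++ pvSplit l cur := by
  induction l with
  | nil =>
    intro fuel cur acc h
    cases fuel with
    | zero => omega
    | succ f => simp [PySem.Chars.splitOn.go, pvSplit]
  | cons c t ih =>
    intro fuel cur acc h
    cases fuel with
    | zero => omega
    | succ f =>
      by_cases hc : c = '>'
      · subst hc
        rw [PySem.Chars.splitOn.go]
        simp [List.isPrefixOf, pvSplit, ih f [] (cur.reverse :: acc) (by simpa using h)]
      · rw [PySem.Chars.splitOn.go]
        simp [List.isPrefixOf, pvSplit, hc, Ne.symm hc, ih f (c :: cur) acc (by simpa using h)]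

theorem pvSplitOn_eq (l : List Char) : PySem.Chars.splitOn l ['>'] = pvSplit l [] := by
  simpa [PySem.Chars.splitOn] using pvGo_eq l (l.length + 1) [] [] (by omega)

theorem pvCnt_eq_sum (segs : List (List Char)) :
    pvCnt false segs =
      ((segs.dropLast).map (fun x => if x.contains '<' then (1 : Int) else 0)).sum := by
  induction segs with
  | nil => simp [pvCnt]
  | cons x rest ih =>
    cases rest with
    | nil => simp [pvCnt]
    | cons y r =>
      simp only [pvCnt, List.dropLast_cons₂, List.map_cons, List.sum_cons, ih, Bool.false_or]

theorem pvIsIn_singleton (s : List Char) :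
    PySem.Chars.isIn ['<'] s = s.contains '<' := by
  have hiff := PySem.Chars.findFrom_natCast_eq_neg_one_iff s ['<'] 0 (by omega)
  rw [show ((0 : Nat) : Int) = 0 from rfl, PySem.Chars.findFrom_zero, List.drop_zero] at hiff
  simp only [PySem.Chars.isIn]
  by_cases hm : '<' ∈ s
  · have hinf : ['<'] <:+: s := by
      obtain ⟨p, q, hpq⟩ := List.append_of_mem hm
      exact ⟨p, q, by simp [hpq]⟩
    have : PySem.Chars.find s ['<'] ≠ -1 := fun h => (hiff.mp h) hinf
    simp [this, hm]
  · have : PySem.Chars.find s ['<'] = -1 :=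
      hiff.mpr (fun hinf => hm (hinf.subset (by simp)))
    simp [this, hm]

theorem pvSlice_neg_one {α : Type} (xs : List α) :
    PySem.List.slice xs none (some (-1)) = xs.dropLast := by
  simp only [PySem.List.slice, PySem.List.clampIdx]
  cases xs with
  | nil => simp
  | cons a t =>
    have h1 : ¬ ((a :: t).length : Int) + (-1) < 0 := by
      simp only [List.length_cons]; push_cast; omega
    rw [if_pos (by norm_num), if_neg h1, List.dropLast_eq_take]
    congr 1
    simp only [List.length_cons]
    push_cast
    omega

-- ===== VERDICT (by name: the statement is the Claim_ definition above) =====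
theorem count_placeholders_py_spec : Claim_equal_count_placeholders_py := by
  intro text _
  unfold Spec_count_placeholders_py count_placeholders_py count_placeholders_py_alt
  rw [pvFold_eq, pvSlice_neg_one,
    show (">".toList) = ['>'] from rfl, pvSplitOn_eq]
  have h := pvG_eq_cnt text.toList [] false
  simp only [List.contains_nil, Bool.or_false] at h
  rw [zero_add, h, pvCnt_eq_sum]
  congr 1
  apply List.map_congr_left
  intro x _
  rw [show ("<".toList) = ['<'] from rfl, pvIsIn_singleton]
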